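-- pv_equiv track=rewrite | github.com/FyDob/ClassificationSumSem17 | feature_extraction.py | make_hapax_legomena
-- ===== SOURCE A (Python) =====
-- def make_hapax_legomena(tokenized_sentence):
-- 	'''	input: tokenized comment as list of tokens
-- 		returns: number of hapax legomena'''
-- 	hapaxes = 0
-- 	words = {}
-- 	for token in tokenized_sentence:
-- 		if token in words:
-- 			words[token] += 1
-- 		else:
-- 			words[token] = 1
-- 	for word in words:
-- 		if words[word] == 1:
-- 			hapaxes += 1
-- 	return hapaxes
-- ===== SOURCE B (Python) =====
-- def make_hapax_legomena(tokenized_sentence):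
--     '''Single pass with two sets instead of a frequency dict: `hapax` holds
--     exactly the tokens seen once so far, `seen` the tokens seen at all.'''
--     seen = set()
--     hapax = set()
--     for token in tokenized_sentence:
--         if token in hapax:
--             hapax.discard(token)
--         elif token not in seen:
--             seen.add(token)
--             hapax.add(token)
--     return len(hapax)
-- ===== Notes on version B (the rewrite author's own statement) =====
-- stated objective: alternative
-- what changed: Replaced the frequency dictionary plus a second counting pass over its keys by a single pass that toggles tokens in/out of a 'seen-exactly-once' set and returns its size.
import Mathlib
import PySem

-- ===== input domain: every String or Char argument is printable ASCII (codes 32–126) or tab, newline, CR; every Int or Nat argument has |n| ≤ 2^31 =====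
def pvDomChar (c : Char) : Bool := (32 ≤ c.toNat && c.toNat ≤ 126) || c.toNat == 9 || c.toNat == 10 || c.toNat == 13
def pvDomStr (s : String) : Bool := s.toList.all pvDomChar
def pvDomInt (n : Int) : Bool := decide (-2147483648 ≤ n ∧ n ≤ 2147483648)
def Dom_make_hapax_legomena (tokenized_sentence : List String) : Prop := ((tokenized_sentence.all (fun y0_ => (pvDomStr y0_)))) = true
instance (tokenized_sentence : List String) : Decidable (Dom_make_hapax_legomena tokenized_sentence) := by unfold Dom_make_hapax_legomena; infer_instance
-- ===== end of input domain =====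

-- B replaces A's frequency dictionary + second counting pass by a single pass that
-- toggles tokens in/out of a 'seen exactly once' set and returns its size (objective: alternative).

-- ===== PORT A =====
def make_hapax_legomena (tokenized_sentence : List String) : Int :=
  let words := tokenized_sentence.foldl
    (fun d token =>
      if PySem.Dict.contains d token then PySem.Dict.modify d token 0 (· + 1)
      else PySem.Dict.insert d token (1 : Int))
    PySem.Dict.empty
  (PySem.Dict.keys words).foldl
    (fun hapaxes word => if PySem.Dict.getD words word 0 == 1 then hapaxes + 1 else hapaxes) 0

-- ===== PORT B =====
-- the body of B's single for-loop
def hapaxStep (st : PySem.Set String × PySem.Set String) (token : String) :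
    PySem.Set String × PySem.Set String :=
  if PySem.Set.contains st.2 token then (st.1, PySem.Set.discard st.2 token)
  else if !PySem.Set.contains st.1 token then
    (PySem.Set.add st.1 token, PySem.Set.add st.2 token)
  else st

def make_hapax_legomena_alt (tokenized_sentence : List String) : Int :=
  let st := tokenized_sentence.foldl hapaxStep (PySem.Set.empty, PySem.Set.empty)
  PySem.Set.len st.2

-- ===== PRECONDITION & SPEC =====
def Spec_make_hapax_legomena (tokenized_sentence : List String) (out : Int) : Prop := out = make_hapax_legomena_alt tokenized_sentence
instance (tokenized_sentence : List String) (out : Int) : Decidable (Spec_make_hapax_legomena tokenized_sentence out) := by unfold Spec_make_hapax_legomena; infer_instance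

-- ===== CLAIM (what is proved, stated in full; the proofs are below) =====
def Claim_equal_make_hapax_legomena : Prop := ∀ (tokenized_sentence : List String), Dom_make_hapax_legomena tokenized_sentence → Spec_make_hapax_legomena tokenized_sentence (make_hapax_legomena tokenized_sentence)

-- ===== LEMMAS AND PROOFS =====

-- A's build loop is exactly collections.Counter
lemma buildA_eq_counter (l : List String) :
    l.foldl
      (fun d token =>
        if PySem.Dict.contains d token then PySem.Dict.modify d token 0 (· + 1)
        else PySem.Dict.insert d token (1 : Int))
      PySem.Dict.empty = PySem.Dict.counter l := by
  rw [PySem.Dict.counter_eq_foldl]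
  congr 1
  funext d t
  by_cases h : PySem.Dict.contains d t
  · simp [h]
  · have hf : PySem.Dict.contains d t = false := by simpa using h
    have hmod : PySem.Dict.modify d t (0 : Int) (· + 1)
        = PySem.Dict.insert d t (PySem.Dict.getD d t 0 + 1) := rfl
    rw [if_neg (by simp [hf]), hmod, PySem.Dict.getD_of_not_contains d 0 hf]
    norm_num

-- A counts the distinct tokens whose count is 1
lemma A_eq_countP (l : List String) :
    make_hapax_legomena l
      = ((PySem.Set.ofList l).countP (fun w => l.count w == 1) : Int) := by
  simp only [make_hapax_legomena, buildA_eq_counter, PySem.Dict.keys_counter]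
  rw [PySem.List.foldl_count_if]
  have hpq : ∀ w ∈ PySem.Set.ofList l,
      (((PySem.Dict.counter l).getD w 0 == 1) = true ↔ (l.count w == 1) = true) := by
    intro w _
    rw [PySem.Dict.getD_counter]
    simp
  rw [List.countP_congr hpq]
  simp

-- loop invariant for B: after processing a prefix, seen = its members,
-- hapax = the tokens occurring exactly once in it
lemma foldB_inv : ∀ (l pref seen hapax : List String),
    seen.Nodup → hapax.Nodup →
    (∀ t, t ∈ seen ↔ t ∈ pref) → (∀ t, t ∈ hapax ↔ pref.count t = 1) →
    (l.foldl hapaxStep (seen, hapax)).2.Nodup ∧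
      ∀ t, t ∈ (l.foldl hapaxStep (seen, hapax)).2 ↔ (pref ++ l).count t = 1 := by
  intro l
  induction l with
  | nil =>
    intro pref seen hapax _ hh _ hmh
    exact ⟨hh, by simpa using hmh⟩
  | cons x xs ih =>
    intro pref seen hapax hs hh hms hmh
    have hcount : ∀ t : String, (pref ++ [x]).count t
        = pref.count t + if t = x then 1 else 0 := by
      intro t
      rw [List.count_append]
      by_cases ht : t = x
      · subst ht; rw [if_pos rfl]; simp
      · rw [if_neg ht]; simp [List.count_eq_zero, ht]
    simp only [List.foldl_cons]
    have key : (hapaxStep (seen, hapax) x).1.Nodup ∧ (hapaxStep (seen, hapax) x).2.Nodup ∧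
        (∀ t, t ∈ (hapaxStep (seen, hapax) x).1 ↔ t ∈ pref ++ [x]) ∧
        (∀ t, t ∈ (hapaxStep (seen, hapax) x).2 ↔ (pref ++ [x]).count t = 1) := by
      by_cases h2 : x ∈ hapax
      · have hstep : hapaxStep (seen, hapax) x = (seen, PySem.Set.discard hapax x) := by
          simp [hapaxStep, h2]
        have hx1 : pref.count x = 1 := (hmh x).mp h2
        have hxp : x ∈ pref := List.count_pos_iff.mp (by omega)
        rw [hstep]
        refine ⟨hs, PySem.Set.nodup_discard hapax x hh, ?_, ?_⟩
        · intro t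
          rw [hms t, List.mem_append]
          constructor
          · exact Or.inl
          · rintro (h | h)
            · exact h
            · simp at h; subst h; exact hxp
        · intro t
          rw [PySem.Set.mem_discard, hmh t, hcount t]
          by_cases ht : t = x
          · subst ht; simp [hx1]
          · simp [ht]
      · by_cases h1 : x ∈ seen
        · have hstep : hapaxStep (seen, hapax) x = (seen, hapax) := by
            simp [hapaxStep, h2, h1]
          have hxp : x ∈ pref := (hms x).mp h1
          have hxpos : 0 < pref.count x := List.count_pos_iff.mpr hxp
          have hxne : pref.count x ≠ 1 := fun hc => h2 ((hmh x).mpr hc)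
          rw [hstep]
          refine ⟨hs, hh, ?_, ?_⟩
          · intro t
            rw [hms t, List.mem_append]
            constructor
            · exact Or.inl
            · rintro (h | h)
              · exact h
              · simp at h; subst h; exact hxp
          · intro t
            rw [hmh t, hcount t]
            by_cases ht : t = x
            · subst ht; constructor <;> intro h <;> omega
            · simp [ht]
        · have hstep : hapaxStep (seen, hapax) x
              = (PySem.Set.add seen x, PySem.Set.add hapax x) := by
            simp [hapaxStep, h2, h1]
          have hxp : x ∉ pref := fun h => h1 ((hms x).mpr h)
          have hx0 : pref.count x = 0 := List.count_eq_zero.mpr hxp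
          rw [hstep]
          refine ⟨PySem.Set.nodup_add seen x hs, PySem.Set.nodup_add hapax x hh, ?_, ?_⟩
          · intro t
            rw [PySem.Set.mem_add, hms t, List.mem_append]
            simp
          · intro t
            rw [PySem.Set.mem_add, hmh t, hcount t]
            by_cases ht : t = x
            · subst ht; simp [hx0]
            · simp [ht]
    obtain ⟨k1, k2, k3, k4⟩ := key
    have hres := ih (pref ++ [x]) (hapaxStep (seen, hapax) x).1 (hapaxStep (seen, hapax) x).2
      k1 k2 k3 k4
    have e : pref ++ [x] ++ xs = pref ++ x :: xs := by simp
    rw [e] at hres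
    exact hres

-- B's final set holds exactly the tokens occurring once in the whole input
lemma B_char (l : List String) :
    (l.foldl hapaxStep (PySem.Set.empty, PySem.Set.empty)).2.Nodup ∧
      ∀ t, t ∈ (l.foldl hapaxStep (PySem.Set.empty, PySem.Set.empty)).2 ↔ l.count t = 1 := by
  have := foldB_inv l [] [] [] List.nodup_nil List.nodup_nil (by simp) (by simp)
  simpa using this

-- ===== VERDICT (by name: the statement is the Claim_ definition above) =====
theorem make_hapax_legomena_spec : Claim_equal_make_hapax_legomena := by
  intro l _
  show make_hapax_legomena l = make_hapax_legomena_alt l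
  rw [A_eq_countP]
  simp only [make_hapax_legomena_alt]
  obtain ⟨hnd, hmem⟩ := B_char l
  have hK : ((PySem.Set.ofList l).filter (fun w => l.count w == 1)).Nodup :=
    (PySem.Set.nodup_ofList l).filter _
  have hperm : (l.foldl hapaxStep (PySem.Set.empty, PySem.Set.empty)).2.Perm
      ((PySem.Set.ofList l).filter (fun w => l.count w == 1)) := by
    rw [List.perm_ext_iff_of_nodup hnd hK]
    intro t
    rw [hmem t, List.mem_filter, PySem.Set.mem_ofList]
    constructor
    · intro h
      exact ⟨List.count_pos_iff.mp (by omega), by simpa using h⟩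
    · intro ⟨_, h⟩
      simpa using h
  have hlen := hperm.length_eq
  rw [List.countP_eq_length_filter]
  show _ = PySem.Set.len _
  simp only [PySem.Set.len, hlen]
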